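-- pv_equiv track=rewrite | github.com/pranayagarwal1-cpu/Financial-Data-Extractor | coa/matcher.py | find_overlap
-- ===== SOURCE A (Python) =====
-- from typing import Dict, List, Optional, Set, Tuple
--
-- def find_overlap(pnl_tokens: Set[str], coa_tokens: Set[str]) -> Tuple[Set[str], Set[str]]:
--     """
--     Find overlapping tokens between P&L label and CoA account.
--
--     Uses exact stem match only - no substring matching to avoid false positives
--     like "re" (from Real Estate) matching "cremat" (from Cremation).
--
--     Returns:
--         Tuple of (matched_tokens, pnl_unmatched_tokens)
--     """
--     matched = set()
--     pnl_remaining = set(pnl_tokens)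
--
--     for pnl_token in pnl_tokens:
--         for coa_token in coa_tokens:
--             # Exact stem match only
--             if pnl_token == coa_token:
--                 matched.add(pnl_token)
--                 pnl_remaining.discard(pnl_token)
--                 break
--             # Word boundary match: one token starts with the other (min 5 chars)
--             # This catches "vaccin" == "vaccin" but not "re" in "cremat"
--             elif len(pnl_token) >= 5 and len(coa_token) >= 5:
--                 if pnl_token.startswith(coa_token) or coa_token.startswith(pnl_token):
--                     matched.add(pnl_token)
--                     pnl_remaining.discard(pnl_token)
--                     break
--
--     return matched, pnl_remaining
-- ===== SOURCE B (Python) =====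
-- def find_overlap(pnl_tokens, coa_tokens):
--     """Index-based re-implementation: hash sets of CoA tokens and of their
--     prefixes replace the inner scan over coa_tokens."""
--     coa_set = set(coa_tokens)
--     long_coa = {c for c in coa_tokens if len(c) >= 5}
--     coa_prefixes = {c[:k] for c in long_coa for k in range(5, len(c) + 1)}
--     matched = set()
--     remaining = set()
--     for p in pnl_tokens:
--         if p in coa_set or (len(p) >= 5 and (p in coa_prefixes
--                 or any(p[:k] in long_coa for k in range(5, len(p) + 1)))):
--             matched.add(p)
--         else:
--             remaining.add(p)
--     return matched, remaining
-- ===== Notes on version B (the rewrite author's own statement) =====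
-- stated objective: faster
-- what changed: Replaces A's nested scan of coa_tokens per P&L token by hash-set lookups: a set of CoA tokens for exact matches plus a precomputed set of all length->=5 prefixes of long CoA tokens, so each P&L token is classified in O(L) set probes instead of an O(m*L) scan.
import Mathlib
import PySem

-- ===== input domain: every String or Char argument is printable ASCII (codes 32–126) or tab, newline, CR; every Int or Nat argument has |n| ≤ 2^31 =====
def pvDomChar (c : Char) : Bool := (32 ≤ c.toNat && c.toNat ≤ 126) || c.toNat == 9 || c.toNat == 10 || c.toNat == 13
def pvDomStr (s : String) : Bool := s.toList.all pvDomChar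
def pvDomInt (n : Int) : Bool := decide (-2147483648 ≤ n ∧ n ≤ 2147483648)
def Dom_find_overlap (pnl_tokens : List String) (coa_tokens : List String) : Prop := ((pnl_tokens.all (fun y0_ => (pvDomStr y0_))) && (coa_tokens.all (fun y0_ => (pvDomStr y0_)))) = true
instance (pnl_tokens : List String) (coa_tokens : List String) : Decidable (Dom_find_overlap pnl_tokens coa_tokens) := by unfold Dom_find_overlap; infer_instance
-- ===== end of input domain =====

-- B replaces A's inner scan over coa_tokens by hash-set lookups: a set of CoA
-- tokens for exact matches plus a set of their length-≥5 prefixes (objective: faster).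

-- ===== PORT A =====
-- inner 'for coa_token in coa_tokens: … break' loop of A
def pvInnerA (p : String) : List String → Bool
  | [] => false
  | c :: rest =>
    if p == c then true
    else if 5 ≤ PySem.Str.len p ∧ 5 ≤ PySem.Str.len c then
      if PySem.Str.startswith p c || PySem.Str.startswith c p then true
      else pvInnerA p rest
    else pvInnerA p rest

def find_overlap (pnl_tokens : List String) (coa_tokens : List String) : List String × List String :=
  pnl_tokens.foldl
    (fun st p =>
      if pvInnerA p coa_tokens then (PySem.Set.add st.1 p, PySem.Set.discard st.2 p) else st)
    ((PySem.Set.empty : PySem.Set String), PySem.Set.ofList pnl_tokens)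

-- ===== PORT B =====
-- all prefixes c[:k], k in range(5, len(c)+1)
def pvPrefixes5 (c : String) : List String :=
  (PySem.List.pyRange 5 (PySem.Str.len c + 1)).map (fun k => PySem.Str.slice c none (some k))

def pvMatchB (coa_set long_coa coa_prefixes : PySem.Set String) (p : String) : Bool :=
  PySem.Set.contains coa_set p ||
    (decide (5 ≤ PySem.Str.len p) &&
      (PySem.Set.contains coa_prefixes p ||
        (PySem.List.pyRange 5 (PySem.Str.len p + 1)).any
          (fun k => PySem.Set.contains long_coa (PySem.Str.slice p none (some k)))))

def find_overlap_alt (pnl_tokens : List String) (coa_tokens : List String) : List String × List String :=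
  let coa_set := PySem.Set.ofList coa_tokens
  let long_coa := PySem.Set.ofList (coa_tokens.filter (fun c => decide (5 ≤ PySem.Str.len c)))
  let coa_prefixes := PySem.Set.ofList (long_coa.flatMap pvPrefixes5)
  pnl_tokens.foldl
    (fun st p =>
      if pvMatchB coa_set long_coa coa_prefixes p then (PySem.Set.add st.1 p, st.2)
      else (st.1, PySem.Set.add st.2 p))
    ((PySem.Set.empty : PySem.Set String), (PySem.Set.empty : PySem.Set String))

-- ===== PRECONDITION & SPEC =====
def Spec_find_overlap (pnl_tokens : List String) (coa_tokens : List String) (out : List String × List String) : Prop := out = find_overlap_alt pnl_tokens coa_tokens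
instance (pnl_tokens : List String) (coa_tokens : List String) (out : List String × List String) : Decidable (Spec_find_overlap pnl_tokens coa_tokens out) := by unfold Spec_find_overlap; infer_instance

-- ===== CLAIM (what is proved, stated in full; the proofs are below) =====
def Claim_equal_find_overlap : Prop := ∀ (pnl_tokens : List String) (coa_tokens : List String), Dom_find_overlap pnl_tokens coa_tokens → Spec_find_overlap pnl_tokens coa_tokens (find_overlap pnl_tokens coa_tokens)

-- ===== LEMMAS AND PROOFS =====

-- the match criterion, as a Prop on the token lists
def pvCrit (coa : List String) (p : String) : Prop :=
  ∃ c ∈ coa, p = c ∨ (5 ≤ PySem.Str.len p ∧ 5 ≤ PySem.Str.len c ∧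
    (c.toList <+: p.toList ∨ p.toList <+: c.toList))

theorem pvInnerA_iff (p : String) (coa : List String) :
    pvInnerA p coa = true ↔ pvCrit coa p := by
  induction coa with
  | nil => simp [pvInnerA, pvCrit]
  | cons c t ih =>
    simp only [pvInnerA, pvCrit, List.mem_cons]
    rw [pvCrit] at ih
    split_ifs with h1 h2 h3
    · simp only [true_iff]; exact ⟨c, Or.inl rfl, Or.inl (beq_iff_eq.mp h1)⟩
    · simp only [true_iff]
      exact ⟨c, Or.inl rfl, Or.inr ⟨h2.1, h2.2, by
        rcases Bool.or_eq_true .. |>.mp h3 with h | h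
        · exact Or.inl ((PySem.Chars.startswith_iff _ _).mp (PySem.Str.startswith_eq .. ▸ h))
        · exact Or.inr ((PySem.Chars.startswith_iff _ _).mp (PySem.Str.startswith_eq .. ▸ h))⟩⟩
    · rw [ih]; constructor
      · rintro ⟨d, hd, h⟩; exact ⟨d, Or.inr hd, h⟩
      · rintro ⟨d, (rfl | hd), h⟩
        · rcases h with rfl | ⟨hp, hc, hsw⟩
          · exact absurd (beq_self_eq_true _) h1
          · exfalso; apply h3; simp only [Bool.or_eq_true, PySem.Str.startswith_eq,
              PySem.Chars.startswith_iff]; tauto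
        · exact ⟨d, hd, h⟩
    · rw [ih]; constructor
      · rintro ⟨d, hd, h⟩; exact ⟨d, Or.inr hd, h⟩
      · rintro ⟨d, (rfl | hd), h⟩
        · rcases h with rfl | ⟨hp, hc, hsw⟩
          · exact absurd (beq_self_eq_true _) h1
          · exact absurd ⟨hp, hc⟩ h2
        · exact ⟨d, hd, h⟩

theorem pvSliceEq (p c : String) (k : Int) (hk : 0 ≤ k) :
    p = PySem.Str.slice c none (some k) ↔ p.toList = c.toList.take k.toNat := by
  rw [← String.toList_inj, PySem.Str.toList_slice, PySem.Chars.slice_eq_listSlice,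
    PySem.List.slice_to _ hk]

theorem pvPrefixMem (p c : String) :
    p ∈ pvPrefixes5 c ↔ 5 ≤ PySem.Str.len p ∧ p.toList <+: c.toList := by
  simp only [pvPrefixes5, List.mem_map, PySem.List.mem_pyRange_one]
  constructor
  · rintro ⟨k, ⟨hk5, hklt⟩, rfl⟩
    have h0 : (0:Int) ≤ k := by omega
    have htl : (PySem.Str.slice c none (some k)).toList = c.toList.take k.toNat :=
      (pvSliceEq _ c k h0).mp rfl
    have hkle : k.toNat ≤ c.toList.length := by
      simp only [PySem.Str.len_eq] at hklt; omega
    constructor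
    · rw [PySem.Str.len_eq, htl, List.length_take]; omega
    · rw [htl]; exact List.take_prefix _ _
  · rintro ⟨hp5, hpre⟩
    refine ⟨(p.toList.length : Int), ⟨by simpa [PySem.Str.len_eq] using hp5, ?_⟩, ?_⟩
    · have := hpre.length_le; simp only [PySem.Str.len_eq]; omega
    · rw [eq_comm, pvSliceEq _ _ _ (by positivity)]
      simpa using List.prefix_iff_eq_take.mp hpre

theorem pvMatchB_iff (coa : List String) (p : String) :
    pvMatchB (PySem.Set.ofList coa)
      (PySem.Set.ofList (coa.filter (fun c => decide (5 ≤ PySem.Str.len c))))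
      (PySem.Set.ofList ((PySem.Set.ofList (coa.filter (fun c => decide (5 ≤ PySem.Str.len c)))).flatMap pvPrefixes5))
      p = true ↔ pvCrit coa p := by
  have hmemL : ∀ x : String,
      x ∈ coa.filter (fun c => decide (5 ≤ PySem.Str.len c)) ↔
        x ∈ coa ∧ 5 ≤ PySem.Str.len x := by
    intro x; rw [List.mem_filter]; simp
  simp only [pvMatchB, Bool.or_eq_true, Bool.and_eq_true, List.any_eq_true,
    PySem.Set.contains_iff, PySem.Set.mem_ofList, decide_eq_true_iff,
    List.mem_flatMap, PySem.List.mem_pyRange_one]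
  constructor
  · rintro (hmem | ⟨hp5, hpre | ⟨k, ⟨hk5, hklt⟩, hc⟩⟩)
    · exact ⟨p, hmem, Or.inl rfl⟩
    · obtain ⟨c, hcl, hpc⟩ := hpre
      obtain ⟨hcoa, hc5⟩ := (hmemL c).mp hcl
      exact ⟨c, hcoa, Or.inr ⟨hp5, hc5, Or.inr ((pvPrefixMem p c).mp hpc).2⟩⟩
    · rw [hmemL] at hc
      obtain ⟨hcoa, hc5⟩ := hc
      refine ⟨_, hcoa, Or.inr ⟨hp5, hc5, Or.inl ?_⟩⟩
      have := (pvSliceEq (PySem.Str.slice p none (some k)) p k (by omega)).mp rfl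
      rw [this]; exact List.take_prefix _ _
  · rintro ⟨c, hcoa, rfl | ⟨hp5, hc5, hcp | hpc⟩⟩
    · exact Or.inl hcoa
    · refine Or.inr ⟨hp5, Or.inr ⟨(PySem.Str.len c), ⟨?_, ?_⟩, ?_⟩⟩
      · exact hc5
      · have := hcp.length_le; simp only [PySem.Str.len_eq]; omega
      · rw [hmemL]
        have : PySem.Str.slice p none (some (PySem.Str.len c)) = c := by
          rw [eq_comm, pvSliceEq c p _ (by rw [PySem.Str.len_eq]; positivity)]
          simp only [PySem.Str.len_eq, Int.toNat_natCast]
          exact List.prefix_iff_eq_take.mp hcp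
        rw [this]; exact ⟨hcoa, hc5⟩
    · exact Or.inr ⟨hp5, Or.inl ⟨c, (hmemL c).mpr ⟨hcoa, hc5⟩, (pvPrefixMem p c).mpr ⟨hp5, hpc⟩⟩⟩

theorem pvMatchB_eq_innerA (coa : List String) (p : String) :
    pvMatchB (PySem.Set.ofList coa)
      (PySem.Set.ofList (coa.filter (fun c => decide (5 ≤ PySem.Str.len c))))
      (PySem.Set.ofList ((PySem.Set.ofList (coa.filter (fun c => decide (5 ≤ PySem.Str.len c)))).flatMap pvPrefixes5))
      p = pvInnerA p coa := by
  rw [Bool.eq_iff_iff, pvMatchB_iff, pvInnerA_iff]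

-- a fold over a pair of sets splits into two independent folds (A's loop shape)
theorem pvFoldA_split (f : String → Bool) (pnl : List String)
    (m s : PySem.Set String) :
    pnl.foldl (fun st p => if f p then (PySem.Set.add st.1 p, PySem.Set.discard st.2 p) else st) (m, s)
      = (pnl.foldl (fun m p => if f p then PySem.Set.add m p else m) m,
         pnl.foldl (fun s p => if f p then PySem.Set.discard s p else s) s) := by
  induction pnl generalizing m s with
  | nil => rfl
  | cons p t ih => simp only [List.foldl_cons]; split <;> exact ih _ _

-- the same for B's loop shape
theorem pvFoldB_split (f : String → Bool) (pnl : List String)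
    (m s : PySem.Set String) :
    pnl.foldl (fun st p => if f p then (PySem.Set.add st.1 p, st.2) else (st.1, PySem.Set.add st.2 p)) (m, s)
      = (pnl.foldl (fun m p => if f p then PySem.Set.add m p else m) m,
         pnl.foldl (fun s p => if f p then s else PySem.Set.add s p) s) := by
  induction pnl generalizing m s with
  | nil => rfl
  | cons p t ih => simp only [List.foldl_cons]; split <;> exact ih _ _

theorem pvDiscardFold (f : String → Bool) (pnl : List String) (s : PySem.Set String) :
    pnl.foldl (fun s p => if f p then PySem.Set.discard s p else s) s
      = s.filter (fun x => !(f x && pnl.contains x)) := by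
  induction pnl generalizing s with
  | nil => simp
  | cons p t ih =>
    simp only [List.foldl_cons]
    by_cases hp : f p = true
    · rw [if_pos hp, ih]
      show (PySem.Set.discard s p).filter _ = _
      unfold PySem.Set.discard
      rw [List.filter_filter]
      apply List.filter_congr
      intro x _
      by_cases hxp : x = p
      · subst hxp; simp [hp]
      · simp [hxp]
    · rw [if_neg hp, ih]
      apply List.filter_congr
      intro x _
      by_cases hxp : x = p
      · subst hxp; simp at hp; simp [hp]
      · simp [hxp]

theorem pvAddNotFold (f : String → Bool) (pnl : List String) (s : PySem.Set String) :
    pnl.foldl (fun s p => if f p then s else PySem.Set.add s p) s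
      = PySem.Set.update s (pnl.filter (fun x => !f x)) := by
  induction pnl generalizing s with
  | nil => rfl
  | cons p t ih =>
    simp only [List.foldl_cons, List.filter_cons]
    by_cases hp : f p = true
    · rw [if_pos hp, ih]
      simp [hp]
    · rw [if_neg hp, ih, if_pos (by simp [hp])]
      rfl

theorem pvOfList_filter (g : String → Bool) (xs : List String) :
    (PySem.Set.ofList xs).filter g = PySem.Set.ofList (xs.filter g) := by
  induction xs using List.reverseRecOn with
  | nil => rfl
  | append_singleton t x ih =>
    rw [List.filter_append, PySem.Set.ofList_append_singleton]
    by_cases hg : g x = true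
    · have hfx : List.filter g [x] = [x] := by simp [hg]
      rw [hfx, PySem.Set.ofList_append_singleton]
      by_cases hx : x ∈ t
      · have h1 : (PySem.Set.ofList t).add x = PySem.Set.ofList t := by
          simp [PySem.Set.add, (PySem.Set.mem_ofList t x).mpr hx]
        have h2 : (PySem.Set.ofList (t.filter g)).add x = PySem.Set.ofList (t.filter g) := by
          simp [PySem.Set.add,
            (PySem.Set.mem_ofList (t.filter g) x).mpr (List.mem_filter.mpr ⟨hx, hg⟩)]
        rw [h1, h2, ih]
      · have h1 : (PySem.Set.ofList t).add x = PySem.Set.ofList t ++ [x] := by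
          simp [PySem.Set.add, (PySem.Set.mem_ofList t x).not.mpr hx]
        have h2 : (PySem.Set.ofList (t.filter g)).add x = PySem.Set.ofList (t.filter g) ++ [x] := by
          simp [PySem.Set.add,
            (PySem.Set.mem_ofList (t.filter g) x).not.mpr (fun hm => hx (List.mem_filter.mp hm).1)]
        rw [h1, h2, List.filter_append, hfx, ih]
    · have hfx : List.filter g [x] = [] := by simp [hg]
      rw [hfx, List.append_nil, ← ih]
      by_cases hx : x ∈ t
      · have h1 : (PySem.Set.ofList t).add x = PySem.Set.ofList t := by
          simp [PySem.Set.add, (PySem.Set.mem_ofList t x).mpr hx]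
        rw [h1]
      · have h1 : (PySem.Set.ofList t).add x = PySem.Set.ofList t ++ [x] := by
          simp [PySem.Set.add, (PySem.Set.mem_ofList t x).not.mpr hx]
        rw [h1, List.filter_append, hfx, List.append_nil]

-- ===== VERDICT (by name: the statement is the Claim_ definition above) =====
theorem find_overlap_spec : Claim_equal_find_overlap := by
  intro pnl coa _
  unfold Spec_find_overlap find_overlap find_overlap_alt
  simp only [pvMatchB_eq_innerA]
  rw [pvFoldA_split (fun p => pvInnerA p coa), pvFoldB_split (fun p => pvInnerA p coa),
      pvDiscardFold, pvAddNotFold]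
  have hupd : PySem.Set.update (PySem.Set.empty : PySem.Set String)
      (pnl.filter (fun x => !pvInnerA x coa)) = PySem.Set.ofList (pnl.filter (fun x => !pvInnerA x coa)) := by
    rw [PySem.Set.ofList_eq_foldl]; rfl
  rw [hupd, ← pvOfList_filter]
  refine Prod.ext rfl ?_
  apply List.filter_congr
  intro x hx
  have hxp : x ∈ pnl := (PySem.Set.mem_ofList pnl x).mp hx
  simp [hxp]
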